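-- pv_equiv track=rewrite | github.com/liskos/leonenko | ege15/88.py | f
-- ===== SOURCE A (Python) =====
-- def f(a):
--     b = {2,4,6,8,10,12}
--     c = {3,6,9,12,15}
--     for x in range(1, 101):
--         f = not(x in b) or not((x in c) and not(x in a)) or not(x in b)
--         if not f:
--             return False
--     return True
-- ===== SOURCE B (Python) =====
-- def f(a):
--     # The loop only fails for x in {2,4,6,8,10,12} ∩ {3,6,9,12,15} = {6,12} with x not in a.
--     return 6 in a and 12 in a
-- ===== Notes on version B (the rewrite author's own statement) =====
-- stated objective: simpler
-- what changed: Replaced the 100-iteration loop over hard-coded sets with the closed-form membership test '6 in a and 12 in a', the only condition under which the loop's predicate can fail.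
import Mathlib
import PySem

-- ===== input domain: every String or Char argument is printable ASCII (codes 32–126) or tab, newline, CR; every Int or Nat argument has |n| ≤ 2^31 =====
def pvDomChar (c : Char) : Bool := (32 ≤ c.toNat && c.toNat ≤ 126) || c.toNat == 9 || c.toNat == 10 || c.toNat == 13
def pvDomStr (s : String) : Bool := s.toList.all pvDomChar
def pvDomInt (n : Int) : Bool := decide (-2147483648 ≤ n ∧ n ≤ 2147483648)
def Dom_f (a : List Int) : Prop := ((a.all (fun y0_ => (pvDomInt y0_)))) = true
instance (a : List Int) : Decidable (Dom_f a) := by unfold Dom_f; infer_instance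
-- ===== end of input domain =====

-- B replaces A's 100-iteration loop by the closed-form test '6 in a and 12 in a' (simpler).

-- ===== PORT A =====
-- the loop body's boolean, with b = {2,4,6,8,10,12}, c = {3,6,9,12,15}
def fCond (a : List Int) (x : Int) : Bool :=
  (!(PySem.Set.ofList [2,4,6,8,10,12]).contains x) ||
  (!((PySem.Set.ofList [3,6,9,12,15]).contains x && !(a.contains x))) ||
  (!(PySem.Set.ofList [2,4,6,8,10,12]).contains x)

-- the for-loop with early return False
def fLoop (a : List Int) : List Int → Bool
  | [] => true
  | x :: rest => if !(fCond a x) then false else fLoop a rest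

def f (a : List Int) : Bool := fLoop a (PySem.List.pyRange 1 101 1)

-- ===== PORT B =====
def f_alt (a : List Int) : Bool := a.contains 6 && a.contains 12

-- ===== PRECONDITION & SPEC =====
def Spec_f (a : List Int) (out : Bool) : Prop := out = f_alt a
instance (a : List Int) (out : Bool) : Decidable (Spec_f a out) := by unfold Spec_f; infer_instance

-- ===== CLAIM (what is proved, stated in full; the proofs are below) =====
def Claim_equal_f : Prop := ∀ (a : List Int), Dom_f a → Spec_f a (f a)

-- ===== LEMMAS AND PROOFS =====

-- the early-return loop equals List.all of the body
theorem fLoop_eq_all (a : List Int) (l : List Int) : fLoop a l = l.all (fCond a) := by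
  induction l with
  | nil => rfl
  | cons x rest ih =>
    simp only [fLoop, List.all_cons]
    by_cases h : fCond a x = true
    · simp [h, ih]
    · simp [Bool.eq_false_iff.mpr h]

theorem fCond_true_of_mem (a : List Int) (x : Int) (h6 : (6:Int) ∈ a) (h12 : (12:Int) ∈ a) :
    fCond a x = true := by
  unfold fCond
  by_cases hb : x ∈ (PySem.Set.ofList ([2,4,6,8,10,12] : List Int))
  · by_cases hc : x ∈ (PySem.Set.ofList ([3,6,9,12,15] : List Int))
    · have hx : x = 6 ∨ x = 12 := by
        simp [PySem.Set.mem_ofList] at hb hc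
        omega
      have hxa : x ∈ a := by
        rcases hx with h | h
        · simpa [h] using h6
        · simpa [h] using h12
      simp [hb, hc, hxa]
    · simp [hc]
  · simp [hb]

theorem fCond_six_false (a : List Int) (h6 : (6:Int) ∉ a) : fCond a 6 = false := by
  simp [fCond, PySem.Set.mem_ofList, h6]

theorem fCond_twelve_false (a : List Int) (h12 : (12:Int) ∉ a) : fCond a 12 = false := by
  simp [fCond, PySem.Set.mem_ofList, h12]

theorem six_mem_range : (6:Int) ∈ PySem.List.pyRange 1 101 1 := by decide
theorem twelve_mem_range : (12:Int) ∈ PySem.List.pyRange 1 101 1 := by decide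

-- ===== VERDICT (by name: the statement is the Claim_ definition above) =====
theorem f_spec : Claim_equal_f := by
  intro a _
  unfold Spec_f f f_alt
  rw [fLoop_eq_all]
  by_cases h6 : (6:Int) ∈ a
  · by_cases h12 : (12:Int) ∈ a
    · have : ∀ x ∈ PySem.List.pyRange 1 101 1, fCond a x = true := fun x _ =>
        fCond_true_of_mem a x h6 h12
      simp [List.all_eq_true.mpr this, h6, h12]
    · have : ¬ ((PySem.List.pyRange 1 101 1).all (fCond a) = true) := by
        intro hall
        have := List.all_eq_true.mp hall 12 twelve_mem_range
        rw [fCond_twelve_false a h12] at this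
        exact Bool.false_ne_true this
      simp [Bool.eq_false_iff.mpr this, h12]
  · have : ¬ ((PySem.List.pyRange 1 101 1).all (fCond a) = true) := by
      intro hall
      have := List.all_eq_true.mp hall 6 six_mem_range
      rw [fCond_six_false a h6] at this
      exact Bool.false_ne_true this
    simp [Bool.eq_false_iff.mpr this, h6]
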